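-- pv_equiv track=rewrite | github.com/KallerIsaac10086/YaXIn-ISA | MP编译器v1.py | convert_tokens
-- ===== SOURCE A (Python) =====
-- keywords = {
--     "if": "pureE",
--     "else": "PC_jump",
--     "for": "PC_jump",
--     "while": "pureE",
--     "print": "load Cache-Screen0"
-- }
--
-- def convert_tokens(tokens):
--     instructions = []
--     # Check the first token to determine the type of statement
--     if tokens[0] == "if":
--         # If statement: pureE La XB Xp; PC_jump Xp; PC_jump Xj; ...
--         instructions.append(keywords["if"] + " La XB Xp")
--         instructions.append(keywords["else"] + " Xp")
--         instructions.append(keywords["else"] + " Xj")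
--         # Convert the rest of the tokens recursively
--         instructions.extend(convert_tokens(tokens[2:]))
--     elif tokens[0] == "else":
--         # Else statement: load Cache-Screen0(...); ...
--         instructions.append(keywords["print"] + "(" + tokens[2] + ")")
--         # Convert the rest of the tokens recursively
--         instructions.extend(convert_tokens(tokens[4:]))
--     elif tokens[0] == "for":
--         # For statement: PC_jump Xj; load Cache-Screen0(...); ...
--         instructions.append(keywords["for"] + " Xj")
--         instructions.append(keywords["print"] + "(" + tokens[4] + ")")
--         # Convert the rest of the tokens recursively
--         instructions.extend(convert_tokens(tokens[6:]))
--     elif tokens[0] == "while":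
--         # While statement: pureE La XB Xp; PC_jump Xp; PC_jump Xj; ...
--         instructions.append(keywords["while"] + " La XB Xp")
--         instructions.append(keywords["else"] + " Xp")
--         instructions.append(keywords["else"] + " Xj")
--         # Convert the rest of the tokens recursively
--         instructions.extend(convert_tokens(tokens[2:]))
--     elif tokens[0] == "print":
--         # Print statement: load Cache-Screen0(...)
--         instructions.append(keywords["print"] + "(" + tokens[2] + ")")
--     else:
--         # Other statements: assume they are already in assembly format
--         instructions.append(" ".join(tokens))
--     return instructions
-- ===== SOURCE B (Python) =====
-- keywords = {
--     "if": "pureE",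
--     "else": "PC_jump",
--     "for": "PC_jump",
--     "while": "pureE",
--     "print": "load Cache-Screen0"
-- }
--
-- def convert_tokens(tokens):
--     # One iterative pass with an index pointer (no list slicing, no recursion).
--     out = []
--     i = 0
--     n = len(tokens)
--     while i < n:
--         t = tokens[i]
--         if t == "if" or t == "while":
--             out += [keywords["if"] + " La XB Xp", keywords["else"] + " Xp", keywords["else"] + " Xj"]
--             i += 2
--         elif t == "else":
--             out.append(keywords["print"] + "(" + tokens[i + 2] + ")")
--             i += 4
--         elif t == "for":
--             out.append(keywords["for"] + " Xj")
--             out.append(keywords["print"] + "(" + tokens[i + 4] + ")")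
--             i += 6
--         elif t == "print":
--             out.append(keywords["print"] + "(" + tokens[i + 2] + ")")
--             return out
--         else:
--             out.append(" ".join(tokens[i:]))
--             return out
--     return out
-- ===== Notes on version B (the rewrite author's own statement) =====
-- stated objective: alternative
-- what changed: Replaced A's recursion that re-slices the token list (tokens[2:], tokens[4:], tokens[6:]) at every step by a single iterative while loop advancing an index pointer over the unchanged list; avoids the O(n) copy per step on keyword-heavy input, though typical inputs are dominated by the final join so measured times are equal.
-- outside the precondition, e.g. on convert_tokens([]): A raises IndexError, B returns []; on convert_tokens(['if', 'x']): A raises IndexError, B returns ['pureE La XB Xp', 'PC_jump Xp', 'PC_jump Xj']; on convert_tokens(['print']): A raises IndexError, B raises IndexError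
import Mathlib
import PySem

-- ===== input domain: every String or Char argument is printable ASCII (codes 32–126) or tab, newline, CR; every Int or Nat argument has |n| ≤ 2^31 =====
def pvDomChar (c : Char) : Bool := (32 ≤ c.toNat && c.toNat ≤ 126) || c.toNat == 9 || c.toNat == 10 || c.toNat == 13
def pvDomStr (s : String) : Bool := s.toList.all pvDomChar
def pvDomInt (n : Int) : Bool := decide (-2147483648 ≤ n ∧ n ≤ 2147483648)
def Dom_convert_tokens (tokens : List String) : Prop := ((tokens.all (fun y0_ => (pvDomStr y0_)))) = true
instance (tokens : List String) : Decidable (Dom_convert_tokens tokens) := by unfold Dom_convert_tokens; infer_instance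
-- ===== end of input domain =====

-- B replaces A's recursion over re-sliced lists by one iterative pass with an index pointer (objective: alternative).

-- ===== PORT A =====
-- literal port of A's recursion on slices: tokens[2:] = rest.drop 1, tokens[4:] = rest.drop 3, tokens[6:] = rest.drop 5;
-- tokens[2] = rest.getD 1 "" and tokens[4] = rest.getD 3 "" (nonnegative literal indices; out-of-range raises in Python and is excluded by Pre_)
def convert_tokens : List String → List String
  | [] => []  -- Python raises IndexError on tokens[0] here; excluded by Pre_
  | t0 :: rest =>
    if t0 = "if" then
      ["pureE" ++ " La XB Xp", "PC_jump" ++ " Xp", "PC_jump" ++ " Xj"] ++ convert_tokens (rest.drop 1)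
    else if t0 = "else" then
      ("load Cache-Screen0" ++ "(" ++ rest.getD 1 "" ++ ")") :: convert_tokens (rest.drop 3)
    else if t0 = "for" then
      ("PC_jump" ++ " Xj") :: ("load Cache-Screen0" ++ "(" ++ rest.getD 3 "" ++ ")") :: convert_tokens (rest.drop 5)
    else if t0 = "while" then
      ["pureE" ++ " La XB Xp", "PC_jump" ++ " Xp", "PC_jump" ++ " Xj"] ++ convert_tokens (rest.drop 1)
    else if t0 = "print" then
      ["load Cache-Screen0" ++ "(" ++ rest.getD 1 "" ++ ")"]
    else
      [PySem.Str.join " " (t0 :: rest)]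
termination_by tokens => tokens.length
decreasing_by all_goals (simp [List.length_drop]; try omega)

-- ===== PORT B =====
-- literal port of Source B's while loop: index pointer i, accumulator out
def convertGo (tokens : List String) (i : Nat) (out : List String) : List String :=
  if h : i < tokens.length then
    let t := tokens[i]
    if t = "if" ∨ t = "while" then
      convertGo tokens (i + 2) (out ++ ["pureE" ++ " La XB Xp", "PC_jump" ++ " Xp", "PC_jump" ++ " Xj"])
    else if t = "else" then
      convertGo tokens (i + 4) (out ++ ["load Cache-Screen0" ++ "(" ++ tokens.getD (i + 2) "" ++ ")"])
    else if t = "for" then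
      convertGo tokens (i + 6) (out ++ ["PC_jump" ++ " Xj", "load Cache-Screen0" ++ "(" ++ tokens.getD (i + 4) "" ++ ")"])
    else if t = "print" then
      out ++ ["load Cache-Screen0" ++ "(" ++ tokens.getD (i + 2) "" ++ ")"]
    else
      out ++ [PySem.Str.join " " (tokens.drop i)]
  else out
termination_by tokens.length - i
decreasing_by all_goals omega

def convert_tokens_alt (tokens : List String) : List String :=
  convertGo tokens 0 []

-- ===== PRECONDITION & SPEC =====
-- Pre_ excludes exactly the inputs on which A raises IndexError: the empty list, a missing operand
-- (tokens[2] / tokens[4] past the end), or a recursive tail on which the same happens.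
def preOk : List String → Bool
  | [] => false
  | t0 :: rest =>
    if t0 = "if" ∨ t0 = "while" then
      match rest with
      | _ :: r => preOk r
      | [] => false
    else if t0 = "else" then
      match rest with
      | _ :: _ :: _ :: r => preOk r
      | _ => false
    else if t0 = "for" then
      match rest with
      | _ :: _ :: _ :: _ :: _ :: r => preOk r
      | _ => false
    else if t0 = "print" then
      match rest with
      | _ :: _ :: _ => true
      | _ => false
    else true

def Pre_convert_tokens (tokens : List String) : Prop := preOk tokens = true
instance (tokens : List String) : Decidable (Pre_convert_tokens tokens) := by unfold Pre_convert_tokens; infer_instance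

def pvWitness_convert_tokens : List String := ["print", "x", "y"]

def Spec_convert_tokens (tokens : List String) (out : List String) : Prop := out = convert_tokens_alt tokens
instance (tokens : List String) (out : List String) : Decidable (Spec_convert_tokens tokens out) := by unfold Spec_convert_tokens; infer_instance

-- ===== CLAIM (what is proved, stated in full; the proofs are below) =====
def Claim_equal_convert_tokens : Prop := ∀ (tokens : List String), Dom_convert_tokens tokens → Pre_convert_tokens tokens → Spec_convert_tokens tokens (convert_tokens tokens)

-- ===== LEMMAS AND PROOFS =====

theorem preOk_cons (t0 : String) (rest : List String) :
    preOk (t0 :: rest) =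
      (if t0 = "if" then preOk (rest.drop 1)
       else if t0 = "else" then decide (2 ≤ rest.length) && preOk (rest.drop 3)
       else if t0 = "for" then decide (4 ≤ rest.length) && preOk (rest.drop 5)
       else if t0 = "while" then preOk (rest.drop 1)
       else if t0 = "print" then decide (2 ≤ rest.length)
       else true) := by
  rcases rest with _ | ⟨a, _ | ⟨b, _ | ⟨c, _ | ⟨d, _ | ⟨e, r⟩⟩⟩⟩⟩ <;>
    · rw [preOk]
      split_ifs <;> first | rfl | simp_all

theorem convertGo_eq (fuel : Nat) : ∀ (tokens : List String) (i : Nat) (out : List String),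
    tokens.length - i ≤ fuel → preOk (tokens.drop i) = true →
    convertGo tokens i out = out ++ convert_tokens (tokens.drop i) := by
  induction fuel with
  | zero =>
    intro tokens i out hle hpre
    have hnil : tokens.drop i = [] := by
      rw [List.drop_eq_nil_iff]; omega
    rw [hnil] at hpre
    simp [preOk] at hpre
  | succ n ih =>
    intro tokens i out hle hpre
    by_cases h : i < tokens.length
    · have hd : tokens.drop i = tokens[i] :: tokens.drop (i + 1) := List.drop_eq_getElem_cons h
      rw [convertGo, dif_pos h]
      rw [hd] at hpre ⊢
      rw [preOk_cons] at hpre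
      rw [convert_tokens]
      by_cases h1 : tokens[i] = "if"
      · simp only [h1] at hpre ⊢
        simp at hpre ⊢
        rw [ih tokens (i + 1 + 1) _ (by omega) hpre]
        simp
      · by_cases h2 : tokens[i] = "else"
        · simp only [h2] at hpre ⊢
          simp at hpre ⊢
          rw [ih tokens (i + 1 + 3) _ (by omega) hpre.2,
              show i + 1 + 1 = i + 2 from by omega]
          simp
        · by_cases h3 : tokens[i] = "for"
          · simp only [h3] at hpre ⊢
            simp at hpre ⊢
            rw [ih tokens (i + 1 + 5) _ (by omega) hpre.2,
                show i + 1 + 3 = i + 4 from by omega]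
            simp
          · by_cases h4 : tokens[i] = "while"
            · simp only [h4] at hpre ⊢
              simp at hpre ⊢
              rw [ih tokens (i + 1 + 1) _ (by omega) hpre]
              simp
            · by_cases h5 : tokens[i] = "print"
              · simp only [h5] at hpre ⊢
                simp at hpre ⊢
              · simp only [h1, h2, h3, h4, h5, if_false, ← hd]
                rw [if_neg (by simp)]
    · rw [convertGo, dif_neg h]
      have hnil : tokens.drop i = [] := by
        rw [List.drop_eq_nil_iff]; omega
      rw [hnil] at hpre
      simp [preOk] at hpre

-- ===== VERDICT (by name: the statement is the Claim_ definition above) =====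
theorem convert_tokens_spec : Claim_equal_convert_tokens := by
  intro tokens _ hpre
  unfold Spec_convert_tokens convert_tokens_alt
  rw [convertGo_eq tokens.length tokens 0 [] (by omega) (by simpa using hpre), List.nil_append]
  simp
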